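-- pv_equiv track=rewrite | github.com/bmindur/d3df_digitzer_soft | Python/d3df_single_pmt/analysis.py | _measure_width
-- ===== SOURCE A (Python) =====
-- def _measure_width(mp, mid, positive):
--     ws = we = None
--     if positive:
--         for i in range(1, len(mp)):
--             if mp[i-1] < mid and mp[i] >= mid: ws = i; break
--         for i in range(len(mp)-2, -1, -1):
--             if mp[i] >= mid and mp[i+1] < mid: we = i; break
--     else:
--         for i in range(1, len(mp)):
--             if mp[i-1] > mid and mp[i] <= mid: ws = i; break
--         for i in range(len(mp)-2, -1, -1):
--             if mp[i] <= mid and mp[i+1] > mid: we = i; break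
--     return {'width_start_idx': ws, 'width_end_idx': we, 'pulse_width': (we - ws) if ws is not None and we is not None else None}
-- ===== SOURCE B (Python) =====
-- def _measure_width(mp, mid, positive):
--     # Single forward pass: pick the two threshold tests once, record the first
--     # rising crossing and the last falling crossing in the same loop.
--     if positive:
--         below = lambda v: v < mid
--         high = lambda v: v >= mid
--     else:
--         below = lambda v: v > mid
--         high = lambda v: v <= mid
--     ws = we = None
--     for j in range(1, len(mp)):
--         if ws is None and below(mp[j-1]) and high(mp[j]):
--             ws = j
--         if high(mp[j-1]) and below(mp[j]):
--             we = j - 1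
--     return {'width_start_idx': ws, 'width_end_idx': we,
--             'pulse_width': (we - ws) if ws is not None and we is not None else None}
-- ===== Notes on version B (the rewrite author's own statement) =====
-- stated objective: alternative
-- what changed: Replaces A's two separate scans (a forward break-on-first-rise scan and a backward break-on-first-fall scan) with one forward pass that keeps the first rising crossing and overwrites the last falling crossing, with the two threshold predicates selected once before the loop.
import Mathlib
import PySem

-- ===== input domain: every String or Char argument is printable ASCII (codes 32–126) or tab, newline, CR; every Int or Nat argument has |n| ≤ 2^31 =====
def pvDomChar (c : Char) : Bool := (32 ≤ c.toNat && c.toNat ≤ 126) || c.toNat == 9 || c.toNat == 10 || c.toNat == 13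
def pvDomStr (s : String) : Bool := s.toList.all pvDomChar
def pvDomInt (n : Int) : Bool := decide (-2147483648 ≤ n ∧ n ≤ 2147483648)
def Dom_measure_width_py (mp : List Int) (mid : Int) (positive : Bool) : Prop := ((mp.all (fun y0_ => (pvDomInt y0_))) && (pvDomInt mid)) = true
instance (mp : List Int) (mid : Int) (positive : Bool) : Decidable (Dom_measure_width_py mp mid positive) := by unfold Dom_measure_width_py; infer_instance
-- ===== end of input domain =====

-- B does one forward pass (first rising crossing kept, last falling crossing overwritten)
-- instead of A's two break-loops (forward and backward); same O(n) cost, different decomposition.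

-- ===== PORT A =====
-- 'for i in range(…): if cond: x = i; break' — first index of the range satisfying the test
def firstHit (p : Int → Bool) : List Int → Option Int
  | [] => none
  | i :: t => if p i then some i else firstHit p t

def measure_width_py (mp : List Int) (mid : Int) (positive : Bool) : List (String × Option Int) :=
  let n : Int := PySem.List.len mp
  let g : Int → Int := fun i => PySem.List.pyGetD mp i 0   -- mp[i]; always in range on the indices used
  let ws : Option Int :=
    if positive then
      firstHit (fun i => decide (g (i-1) < mid ∧ mid ≤ g i)) (PySem.List.pyRange 1 n 1)
    else
      firstHit (fun i => decide (mid < g (i-1) ∧ g i ≤ mid)) (PySem.List.pyRange 1 n 1)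
  let we : Option Int :=
    if positive then
      firstHit (fun i => decide (mid ≤ g i ∧ g (i+1) < mid)) (PySem.List.pyRange (n-2) (-1) (-1))
    else
      firstHit (fun i => decide (g i ≤ mid ∧ mid < g (i+1))) (PySem.List.pyRange (n-2) (-1) (-1))
  [("width_start_idx", ws), ("width_end_idx", we),
   ("pulse_width", match ws, we with | some a, some b => some (b - a) | _, _ => none)]

-- ===== PORT B =====
-- B's loop body: keep the first rising crossing in st.1, overwrite the last falling one in st.2
def bStep (below high : Int → Bool) (g : Int → Int) (st : Option Int × Option Int) (j : Int) :
    Option Int × Option Int :=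
  ((if st.1 = none ∧ (below (g (j-1)) && high (g j)) = true then some j else st.1),
   (if (high (g (j-1)) && below (g j)) = true then some (j-1) else st.2))

def measure_width_py_alt (mp : List Int) (mid : Int) (positive : Bool) : List (String × Option Int) :=
  let below : Int → Bool := if positive then fun v => decide (v < mid) else fun v => decide (mid < v)
  let high : Int → Bool := if positive then fun v => decide (mid ≤ v) else fun v => decide (v ≤ mid)
  let g : Int → Int := fun i => PySem.List.pyGetD mp i 0
  let r := (PySem.List.pyRange 1 (PySem.List.len mp) 1).foldl (bStep below high g) (none, none)
  [("width_start_idx", r.1), ("width_end_idx", r.2),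
   ("pulse_width", r.1.bind (fun a => r.2.bind (fun b => some (b - a))))]

-- ===== PRECONDITION & SPEC =====
def Spec_measure_width_py (mp : List Int) (mid : Int) (positive : Bool) (out : List (String × Option Int)) : Prop := out = measure_width_py_alt mp mid positive
instance (mp : List Int) (mid : Int) (positive : Bool) (out : List (String × Option Int)) : Decidable (Spec_measure_width_py mp mid positive out) := by unfold Spec_measure_width_py; infer_instance

-- ===== CLAIM (what is proved, stated in full; the proofs are below) =====
def Claim_equal_measure_width_py : Prop := ∀ (mp : List Int) (mid : Int) (positive : Bool), Dom_measure_width_py mp mid positive → Spec_measure_width_py mp mid positive (measure_width_py mp mid positive)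

-- ===== LEMMAS AND PROOFS =====

theorem firstHit_append (p : Int → Bool) (l1 l2 : List Int) :
    firstHit p (l1 ++ l2) = (firstHit p l1).or (firstHit p l2) := by
  induction l1 with
  | nil => simp [firstHit]
  | cons i t ih =>
    simp only [List.cons_append, firstHit]
    by_cases h : p i <;> simp [h, ih, Option.or]

theorem firstHit_map (p : Int → Bool) (f : Int → Int) (l : List Int) :
    firstHit p (l.map f) = (firstHit (fun x => p (f x)) l).map f := by
  induction l with
  | nil => simp [firstHit]
  | cons i t ih =>
    simp only [List.map_cons, firstHit]
    by_cases h : p (f i) <;> simp [h, ih]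

theorem fold_fst (below high : Int → Bool) (g : Int → Int) (L : List Int) : ∀ (a b : Option Int),
    (L.foldl (bStep below high g) (a, b)).1
      = a.or (firstHit (fun j => below (g (j-1)) && high (g j)) L) := by
  induction L with
  | nil => intro a b; cases a <;> simp [firstHit, Option.or]
  | cons i t ih =>
    intro a b
    simp only [List.foldl_cons, firstHit]
    cases a with
    | none =>
      by_cases h : (below (g (i-1)) && high (g i)) = true <;> simp [bStep, h, ih, Option.or]
    | some w => simp [bStep, ih, Option.or]

theorem fold_snd (below high : Int → Bool) (g : Int → Int) (L : List Int) : ∀ (a b : Option Int),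
    (L.foldl (bStep below high g) (a, b)).2
      = (firstHit (fun j => high (g (j-1)) && below (g j)) L.reverse).elim b (fun j => some (j - 1)) := by
  induction L with
  | nil => intro a b; simp [firstHit]
  | cons i t ih =>
    intro a b
    simp only [List.foldl_cons, List.reverse_cons, firstHit_append]
    rcases hfa : firstHit (fun j => high (g (j-1)) && below (g j)) t.reverse with _ | j
    · by_cases h : (high (g (i-1)) && below (g i)) = true <;>
        simp [bStep, Option.or, hfa, ih, firstHit, h]
    · simp [bStep, Option.or, hfa, ih]

-- range(len-2, -1, -1) is range(1, len) reversed and shifted down by one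
theorem range_bwd (n : Int) :
    PySem.List.pyRange (n-2) (-1) (-1)
      = ((PySem.List.pyRange 1 n 1).reverse.map (fun j => j - 1)) := by
  rw [PySem.List.pyRange_neg_one_eq_reverse, List.map_reverse]
  congr 1
  rw [show n - 2 + 1 = n - 1 from by ring, show (-1 : Int) + 1 = 0 from by ring,
      PySem.List.pyRange_one, PySem.List.pyRange_one, List.map_map,
      show n - 1 - 0 = n - 1 from by ring]
  congr 1
  funext k
  simp

-- the single pass computes exactly A's two scan results, for arbitrary threshold tests
theorem pass_eq (below high : Int → Bool) (g : Int → Int) (n : Int) :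
    (PySem.List.pyRange 1 n 1).foldl (bStep below high g) (none, none)
      = (firstHit (fun i => below (g (i-1)) && high (g i)) (PySem.List.pyRange 1 n 1),
         firstHit (fun i => high (g i) && below (g (i+1))) (PySem.List.pyRange (n-2) (-1) (-1))) := by
  have h1 := fold_fst below high g (PySem.List.pyRange 1 n 1) none none
  have h2 := fold_snd below high g (PySem.List.pyRange 1 n 1) none none
  have h3 : firstHit (fun i => high (g i) && below (g (i+1))) (PySem.List.pyRange (n-2) (-1) (-1))
      = (firstHit (fun j => high (g (j-1)) && below (g j)) (PySem.List.pyRange 1 n 1).reverse).elim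
          none (fun j => some (j - 1)) := by
    rw [range_bwd, firstHit_map]
    have he : (fun x : Int => high (g (x - 1)) && below (g (x - 1 + 1)))
        = (fun j : Int => high (g (j-1)) && below (g j)) := by
      funext x
      rw [show x - 1 + 1 = x from by omega]
    rw [he]
    rcases firstHit (fun j => high (g (j-1)) && below (g j)) (PySem.List.pyRange 1 n 1).reverse <;> simp
  apply Prod.ext <;> simp [h1, h2, h3, Option.or]

-- ===== VERDICT (by name: the statement is the Claim_ definition above) =====
theorem measure_width_py_spec : Claim_equal_measure_width_py := by
  intro mp mid positive _
  unfold Spec_measure_width_py measure_width_py measure_width_py_alt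
  cases positive <;>
    simp only [Bool.false_eq_true, if_false, if_true, pass_eq] <;>
    simp only [Bool.decide_and] <;>
    [rcases firstHit (fun i => decide (mid < PySem.List.pyGetD mp (i-1) 0) &&
        decide (PySem.List.pyGetD mp i 0 ≤ mid)) (PySem.List.pyRange 1 (PySem.List.len mp) 1) with _ | a;
     rcases firstHit (fun i => decide (PySem.List.pyGetD mp (i-1) 0 < mid) &&
        decide (mid ≤ PySem.List.pyGetD mp i 0)) (PySem.List.pyRange 1 (PySem.List.len mp) 1) with _ | a] <;>
    [skip; rcases firstHit (fun i => decide (PySem.List.pyGetD mp i 0 ≤ mid) &&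
        decide (mid < PySem.List.pyGetD mp (i+1) 0)) (PySem.List.pyRange (PySem.List.len mp - 2) (-1) (-1)) with _ | b;
     skip; rcases firstHit (fun i => decide (mid ≤ PySem.List.pyGetD mp i 0) &&
        decide (PySem.List.pyGetD mp (i+1) 0 < mid)) (PySem.List.pyRange (PySem.List.len mp - 2) (-1) (-1)) with _ | b] <;>
    simp
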